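-- pv_equiv track=rewrite | github.com/Zarpyk/Kindergarten-2-SpanishMod | Kindergarten 3/TranslationScripts/Translator-Deaths.py | parse_translated_block
-- ===== SOURCE A (Python) =====
-- def parse_translated_block(block):
--     entries = {}
--     current_field = None
--     for line in block.splitlines():
--         if line.startswith("[Field:"):
--             current_field = line.split(":")[1].strip(" ]")
--             entries[current_field] = ""
--         elif current_field is not None and line.strip():
--             entries[current_field] += line + " "
--     return {field: txt.strip().strip('"') for field, txt in entries.items()}
-- ===== SOURCE B (Python) =====
-- def _sections(lines):
--     """Partition lines into (field-name, body-lines) sections, one per header line."""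
--     sections = []
--     i, n = 0, len(lines)
--     while i < n:
--         if lines[i].startswith("[Field:"):
--             j = i + 1
--             while j < n and not lines[j].startswith("[Field:"):
--                 j += 1
--             sections.append((lines[i].split(":")[1].strip(" ]"), lines[i + 1:j]))
--             i = j
--         else:
--             i += 1
--     return sections
--
--
-- def parse_translated_block(block):
--     result = {}
--     for name, body in _sections(block.splitlines()):
--         parts = [l for l in body if l.strip()]
--         result[name] = " ".join(parts).strip().strip('"')
--     return result
-- ===== Notes on version B (the rewrite author's own statement) =====
-- stated objective: alternative
-- what changed: A's single stateful pass (current-field variable, dict entries mutated line by line) is replaced by a split-then-map decomposition: first partition the lines into (field-name, body-lines) sections at the header lines, then build each field's cleaned value from its section in one step.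
import Mathlib
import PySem

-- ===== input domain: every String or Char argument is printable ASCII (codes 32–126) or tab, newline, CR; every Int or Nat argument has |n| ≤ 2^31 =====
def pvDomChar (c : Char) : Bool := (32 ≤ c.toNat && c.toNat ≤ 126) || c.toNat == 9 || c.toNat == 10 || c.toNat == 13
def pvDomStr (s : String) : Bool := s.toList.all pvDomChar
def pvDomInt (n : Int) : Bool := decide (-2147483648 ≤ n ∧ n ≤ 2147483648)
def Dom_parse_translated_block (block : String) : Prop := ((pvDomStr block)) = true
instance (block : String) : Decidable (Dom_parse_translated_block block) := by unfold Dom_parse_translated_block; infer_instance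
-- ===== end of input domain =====

-- B re-implements A's single stateful accumulation pass as split-into-sections then map; same return value, similar cost.

-- helpers shared by both ports: both Pythons test line.startswith("[Field:") and
-- extract the name with the identical expression line.split(":")[1].strip(" ]").
-- (the `.getD`s are unreachable defaults: split(":") of a line starting "[Field:" has ≥ 2 pieces)
def pvHeader (l : String) : Bool := PySem.Str.startswith l "[Field:"

def pvName (l : String) : String :=
  PySem.Str.stripChars ((PySem.List.pyGet? ((PySem.Str.split? l ":").getD []) 1).getD "") " ]"

-- txt.strip().strip('"')
def pvClean (s : String) : String := PySem.Str.stripChars (PySem.Str.strip s) "\""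

-- ===== PORT A =====
-- loop body of A: state = (entries, current_field); entries[f] += line + " " is modify with the key always present
def pvStepA (st : PySem.Dict String String × Option String) (line : String) :
    PySem.Dict String String × Option String :=
  if pvHeader line then
    (st.1.insert (pvName line) "", some (pvName line))
  else
    match st.2 with
    | some f => if PySem.Str.strip line ≠ "" then (st.1.modify f "" (fun t => t ++ line ++ " "), st.2) else st
    | none => st

def parse_translated_block (block : String) : List (String × String) :=
  let fin := (PySem.Str.splitlines block).foldl pvStepA (PySem.Dict.empty, none)
  ((fin.1.items).foldl (fun d p => d.insert p.1 (pvClean p.2)) PySem.Dict.empty).items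

-- ===== PORT B =====
-- " ".join([l for l in body if l.strip()]).strip().strip('"')
def pvSecVal (body : List String) : String :=
  pvClean (PySem.Str.join " " (body.filter (fun l => PySem.Str.strip l ≠ "")))

-- _sections: at a header line take the body lines up to the next header, else skip the line
def pvSections : List String → List (String × List String)
  | [] => []
  | l :: ls =>
    if pvHeader l then
      (pvName l, ls.takeWhile (fun x => !pvHeader x)) :: pvSections (ls.dropWhile (fun x => !pvHeader x))
    else pvSections ls
termination_by ls => ls.length
decreasing_by
  · have := List.length_dropWhile_le (fun x => !pvHeader x) ls; simp; omega
  · simp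

-- result[name] = pvSecVal body
def pvIns (d : PySem.Dict String String) (s : String × List String) : PySem.Dict String String :=
  d.insert s.1 (pvSecVal s.2)

def parse_translated_block_alt (block : String) : List (String × String) :=
  ((pvSections (PySem.Str.splitlines block)).foldl pvIns PySem.Dict.empty).items

-- ===== PRECONDITION & SPEC =====
def Spec_parse_translated_block (block : String) (out : List (String × String)) : Prop := out = parse_translated_block_alt block
instance (block : String) (out : List (String × String)) : Decidable (Spec_parse_translated_block block out) := by unfold Spec_parse_translated_block; infer_instance

-- ===== CLAIM (what is proved, stated in full; the proofs are below) =====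
def Claim_equal_parse_translated_block : Prop := ∀ (block : String), Dom_parse_translated_block block → Spec_parse_translated_block block (parse_translated_block block)

-- ===== LEMMAS AND PROOFS =====

-- A's raw accumulated text for a run of body lines, starting from t
def pvAppRaw (t : String) (body : List String) : String :=
  body.foldl (fun t l => if PySem.Str.strip l ≠ "" then t ++ l ++ " " else t) t

-- the final dict comprehension of A, as a value-map over a dict
def pvMapC (d : PySem.Dict String String) : PySem.Dict String String :=
  ⟨d.items.map (fun p => (p.1, pvClean p.2))⟩

lemma pv_rstrip_append_space (cs : List Char) :
    PySem.Chars.rstrip (cs ++ [' ']) = PySem.Chars.rstrip cs := by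
  simp [PySem.Chars.rstrip, show PySem.Chars.isspace ' ' = true by decide]

lemma pv_strip_append_space (cs : List Char) :
    PySem.Chars.strip (cs ++ [' ']) = PySem.Chars.strip cs := by
  unfold PySem.Chars.strip PySem.Chars.lstrip
  rw [List.dropWhile_append]
  split
  · next h =>
    simp only [List.isEmpty_iff] at h
    rw [h]
    simp [show PySem.Chars.isspace ' ' = true by decide, PySem.Chars.rstrip]
  · exact pv_rstrip_append_space _

lemma pv_flatten_map_space (ls : List (List Char)) (h : ls ≠ []) :
    (ls.map (· ++ [' '])).flatten = PySem.Chars.join [' '] ls ++ [' '] := by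
  induction ls with
  | nil => simp at h
  | cons x t ih =>
    cases t with
    | nil => simp [PySem.Chars.join_singleton]
    | cons y t' =>
      rw [PySem.Chars.join_cons_cons]
      simp only [List.map_cons, List.flatten_cons] at *
      rw [ih (by simp)]
      simp

lemma pv_foldl_concat_toList (parts : List String) (t : String) :
    (parts.foldl (fun a l => a ++ l ++ " ") t).toList
      = t.toList ++ (parts.map (fun l => l.toList ++ [' '])).flatten := by
  induction parts generalizing t with
  | nil => simp
  | cons p ps ih =>
    simp only [List.foldl_cons, List.map_cons, List.flatten_cons]
    rw [ih]
    simp [String.toList_append, show (" " : String).toList = [' '] from rfl]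

lemma pv_clean_congr (s t : String)
    (h : PySem.Chars.strip s.toList = PySem.Chars.strip t.toList) : pvClean s = pvClean t := by
  simp only [pvClean, PySem.Str.stripChars, PySem.Str.strip, String.toList_ofList]
  rw [h]

lemma pv_clean_foldl_eq_clean_join (parts : List String) :
    pvClean (parts.foldl (fun a l => a ++ l ++ " ") "") = pvClean (PySem.Str.join " " parts) := by
  apply pv_clean_congr
  rw [pv_foldl_concat_toList]
  have hj : (PySem.Str.join " " parts).toList
      = PySem.Chars.join [' '] (parts.map String.toList) := by
    simp [PySem.Str.join, String.toList_ofList, show (" " : String).toList = [' '] from rfl]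
  cases parts with
  | nil => simp [hj, PySem.Chars.join_nil]
  | cons p ps =>
    rw [hj]
    have : ((p :: ps).map (fun l => String.toList l ++ [' '])).flatten
        = PySem.Chars.join [' '] ((p :: ps).map String.toList) ++ [' '] := by
      have := pv_flatten_map_space ((p :: ps).map String.toList) (by simp)
      simpa [List.map_map, Function.comp] using this
    simp only [show ("" : String).toList = [] from rfl, List.nil_append]
    rw [this, pv_strip_append_space]

lemma pv_appRaw_eq (body : List String) :
    pvAppRaw "" body
      = (body.filter (fun l => PySem.Str.strip l ≠ "")).foldl (fun a l => a ++ l ++ " ") "" := by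
  simp only [pvAppRaw]
  rw [PySem.List.foldl_ite_eq_foldl_filter (p := fun l => PySem.Str.strip l ≠ "")
      (f := fun a l => a ++ l ++ " ")]

lemma pv_clean_appRaw (body : List String) : pvClean (pvAppRaw "" body) = pvSecVal body := by
  rw [pv_appRaw_eq, pv_clean_foldl_eq_clean_join]
  rfl

lemma pv_mapC_contains (d : PySem.Dict String String) (k : String) :
    (pvMapC d).contains k = d.contains k := by
  simp [pvMapC, PySem.Dict.contains, List.any_map, Function.comp_def]

lemma pv_mapC_insert (d : PySem.Dict String String) (k : String) (v : String) :
    pvMapC (d.insert k v) = (pvMapC d).insert k (pvClean v) := by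
  apply PySem.Dict.ext
  show (d.insert k v).items.map (fun p => (p.1, pvClean p.2))
      = ((pvMapC d).insert k (pvClean v)).items
  rw [PySem.Dict.items_insert, PySem.Dict.items_insert, pv_mapC_contains]
  by_cases h : d.contains k
  · simp only [h, if_true, pvMapC, List.map_map]
    apply List.map_congr_left
    intro p _
    by_cases hp : p.1 = k <;> simp [hp]
  · simp [h, pvMapC]

lemma pv_L1 (ls : List String) (d : PySem.Dict String String) (f : String) :
    ∀ s : String, ls.foldl pvStepA (d.insert f s, some f)
      = (ls.dropWhile (fun x => !pvHeader x)).foldl pvStepA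
          (d.insert f (pvAppRaw s (ls.takeWhile (fun x => !pvHeader x))), some f) := by
  induction ls with
  | nil => intro s; rfl
  | cons l t ih =>
    intro s
    rw [List.foldl_cons, List.takeWhile_cons, List.dropWhile_cons]
    cases h : pvHeader l with
    | true =>
      simp only [Bool.not_true, if_false, Bool.false_eq_true]
      rw [show pvAppRaw s [] = s from rfl, List.foldl_cons]
    | false =>
      simp only [Bool.not_false, if_true]
      by_cases hb : PySem.Str.strip l ≠ ""
      · have hstep : pvStepA (d.insert f s, some f) l = (d.insert f (s ++ l ++ " "), some f) := by
          simp [pvStepA, h, hb, PySem.Dict.modify, PySem.Dict.getD_insert_self,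
            PySem.Dict.insert_insert_self]
        rw [hstep, ih (s ++ l ++ " ")]
        have harr : pvAppRaw (s ++ l ++ " ") (t.takeWhile (fun x => !pvHeader x))
            = pvAppRaw s (l :: t.takeWhile (fun x => !pvHeader x)) := by
          simp [pvAppRaw, hb]
        rw [harr]
      · have hb' : PySem.Str.strip l = "" := not_not.mp hb
        have hstep : pvStepA (d.insert f s, some f) l = (d.insert f s, some f) := by
          simp [pvStepA, h, hb']
        rw [hstep, ih s]
        have harr : pvAppRaw s (t.takeWhile (fun x => !pvHeader x))
            = pvAppRaw s (l :: t.takeWhile (fun x => !pvHeader x)) := by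
          simp [pvAppRaw, hb']
        rw [harr]

lemma pvSections_nil : pvSections [] = [] := by rw [pvSections]

lemma pvSections_cons_header (l : String) (ls : List String) (h : pvHeader l = true) :
    pvSections (l :: ls)
      = (pvName l, ls.takeWhile (fun x => !pvHeader x))
          :: pvSections (ls.dropWhile (fun x => !pvHeader x)) := by
  rw [pvSections]; simp [h]

lemma pvSections_cons_skip (l : String) (ls : List String) (h : pvHeader l = false) :
    pvSections (l :: ls) = pvSections ls := by
  rw [pvSections]; simp [h]

lemma pvSections_dropWhile (ls : List String) :
    pvSections (ls.dropWhile (fun x => !pvHeader x)) = pvSections ls := by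
  induction ls with
  | nil => simp
  | cons l t ih =>
    by_cases h : pvHeader l
    · simp [h]
    · rw [List.dropWhile_cons]
      simp only [h, Bool.not_false, if_true]
      rw [ih, pvSections_cons_skip l t (by simp [h])]

lemma pv_header_of_dropWhile (ls ls' : List String) (r : String)
    (h : ls.dropWhile (fun x => !pvHeader x) = r :: ls') : pvHeader r = true := by
  induction ls generalizing ls' with
  | nil => simp at h
  | cons a t ih =>
    rw [List.dropWhile_cons] at h
    cases ha : pvHeader a with
    | true =>
      simp [ha] at h
      rw [← h.1, ha]
    | false =>
      simp [ha] at h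
      exact ih ls' h

lemma pv_M2 : ∀ (n : Nat) (ls : List String), ls.length ≤ n →
    ∀ (d : PySem.Dict String String) (f : String),
    pvMapC ((ls.foldl pvStepA (d.insert f "", some f)).1)
      = (pvSections ls).foldl pvIns
          ((pvMapC d).insert f (pvSecVal (ls.takeWhile (fun x => !pvHeader x)))) := by
  intro n
  induction n with
  | zero =>
    intro ls hls d f
    have : ls = [] := List.eq_nil_of_length_eq_zero (Nat.le_zero.mp hls)
    subst this
    simp only [List.foldl_nil, List.takeWhile_nil, pvSections_nil]
    rw [pv_mapC_insert, show pvSecVal [] = pvClean "" from rfl]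
  | succ m ih =>
    intro ls hls d f
    rw [pv_L1]
    rcases hrest : ls.dropWhile (fun x => !pvHeader x) with _ | ⟨r, ls'⟩
    · simp only [List.foldl_nil]
      rw [pv_mapC_insert, pv_clean_appRaw]
      rw [← pvSections_dropWhile ls, hrest, pvSections_nil]
      simp
    · have hr : pvHeader r = true := pv_header_of_dropWhile ls ls' r hrest
      have hlen : ls'.length ≤ m := by
        have h1 := List.length_dropWhile_le (fun x => !pvHeader x) ls
        rw [hrest] at h1
        simp at h1
        omega
      rw [show (r :: ls').foldl pvStepA
            (d.insert f (pvAppRaw "" (ls.takeWhile (fun x => !pvHeader x))), some f)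
          = ls'.foldl pvStepA
            (pvStepA (d.insert f (pvAppRaw "" (ls.takeWhile (fun x => !pvHeader x))), some f) r)
          from rfl]
      have hstep : pvStepA
            (d.insert f (pvAppRaw "" (ls.takeWhile (fun x => !pvHeader x))), some f) r
          = ((d.insert f (pvAppRaw "" (ls.takeWhile (fun x => !pvHeader x)))).insert
              (pvName r) "", some (pvName r)) := by
        simp [pvStepA, hr]
      rw [hstep, ih ls' hlen _ (pvName r)]
      rw [← pvSections_dropWhile ls, hrest, pvSections_cons_header r ls' hr]
      simp only [List.foldl_cons, pvIns]
      rw [pv_mapC_insert, pv_clean_appRaw, pvSections_dropWhile ls']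

lemma pv_M (ls : List String) (d : PySem.Dict String String) :
    pvMapC ((ls.foldl pvStepA (d, none)).1) = (pvSections ls).foldl pvIns (pvMapC d) := by
  induction ls generalizing d with
  | nil => simp [pvSections_nil]
  | cons l t ih =>
    by_cases h : pvHeader l
    · have hstep : pvStepA (d, none) l = (d.insert (pvName l) "", some (pvName l)) := by
        simp [pvStepA, h]
      rw [show (l :: t).foldl pvStepA (d, none) = t.foldl pvStepA (pvStepA (d, none) l)
            from rfl, hstep]
      rw [pv_M2 t.length t le_rfl d (pvName l)]
      rw [pvSections_cons_header l t h]
      simp only [List.foldl_cons, pvIns]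
      rw [pvSections_dropWhile t]
    · have hstep : pvStepA (d, none) l = (d, none) := by simp [pvStepA, h]
      rw [show (l :: t).foldl pvStepA (d, none) = t.foldl pvStepA (pvStepA (d, none) l)
            from rfl, hstep, ih, pvSections_cons_skip l t (by simp [h])]

lemma pv_step_nodup (d : PySem.Dict String String) (c : Option String) (l : String)
    (h : d.keys.Nodup) : (pvStepA (d, c) l).1.keys.Nodup := by
  unfold pvStepA
  split
  · exact PySem.Dict.nodup_keys_insert _ _ _ h
  · cases c with
    | none => exact h
    | some f =>
      simp only []
      split
      · rw [PySem.Dict.modify]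
        exact PySem.Dict.nodup_keys_insert _ _ _ h
      · exact h

lemma pv_nodupA (ls : List String) (st : PySem.Dict String String × Option String)
    (h : st.1.keys.Nodup) : ((ls.foldl pvStepA st).1).keys.Nodup := by
  induction ls generalizing st with
  | nil => exact h
  | cons l t ih =>
    obtain ⟨d, c⟩ := st
    exact ih _ (pv_step_nodup d c l h)

-- ===== VERDICT (by name: the statement is the Claim_ definition above) =====
theorem parse_translated_block_spec : Claim_equal_parse_translated_block := by
  intro block _
  unfold Spec_parse_translated_block parse_translated_block parse_translated_block_alt
  simp only []
  set lines := PySem.Str.splitlines block with hlines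
  set fin := lines.foldl pvStepA (PySem.Dict.empty, none) with hfin
  have hnd : fin.1.keys.Nodup := pv_nodupA lines _ (by simp [PySem.Dict.empty])
  have hfresh : ∀ p ∈ fin.1.items, (PySem.Dict.empty : PySem.Dict String String).contains p.1 = false := by
    intro p _; simp [PySem.Dict.empty, PySem.Dict.contains]
  have hkeys : (fin.1.items.map (fun p => p.1)).Nodup := hnd
  have := PySem.Dict.items_foldl_insert_fresh (l := fin.1.items)
      (k := fun p => p.1) (v := fun p => pvClean p.2) (d := PySem.Dict.empty) hfresh hkeys
  rw [this]
  have hmap : (PySem.Dict.empty : PySem.Dict String String).items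
      ++ fin.1.items.map (fun p => (p.1, pvClean p.2)) = (pvMapC fin.1).items := by
    simp [PySem.Dict.empty, pvMapC]
  rw [hmap, hfin, pv_M]
  rfl
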